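-- pv_equiv track=rewrite | github.com/MrGmo/codeWars-Python | 7kyu/populate-hash-with-array-keys-and-default-value.py | populate_dict
-- ===== SOURCE A (Python) =====
-- def populate_dict(keys, default):
--     obj = {}
--     for char in keys:
--         if char in obj:
--             obj[char] += 1
--         else:
--             obj[char] = default
--     return obj
-- ===== SOURCE B (Python) =====
-- from collections import Counter
--
-- def populate_dict(keys, default):
--     # Count occurrences first, then build the result in one mapping pass:
--     # a key seen c times ends up at default + (c - 1).
--     return {k: default + c - 1 for k, c in Counter(keys).items()}
-- ===== Notes on version B (the rewrite author's own statement) =====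
-- stated objective: idiomatic
-- what changed: Replaces the branched incremental dict pass with a count-then-map decomposition: Counter(keys) first, then a comprehension mapping each count c to default + c - 1.
import Mathlib
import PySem

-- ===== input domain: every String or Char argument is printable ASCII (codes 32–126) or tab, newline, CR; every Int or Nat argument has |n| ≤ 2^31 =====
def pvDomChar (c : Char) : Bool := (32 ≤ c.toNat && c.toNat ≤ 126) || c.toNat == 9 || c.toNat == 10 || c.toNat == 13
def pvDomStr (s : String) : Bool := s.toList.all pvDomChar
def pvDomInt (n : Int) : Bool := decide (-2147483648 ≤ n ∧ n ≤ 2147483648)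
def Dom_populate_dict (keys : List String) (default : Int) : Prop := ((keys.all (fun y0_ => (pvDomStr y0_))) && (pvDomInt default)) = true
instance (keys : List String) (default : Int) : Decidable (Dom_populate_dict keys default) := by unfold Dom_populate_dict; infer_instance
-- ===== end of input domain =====

-- B changes the decomposition (count first, then map) for idiomatic clarity; same cost, same values.

-- ===== PORT A =====
-- Literal port of A: one pass, branch per element ('if char in obj: obj[char] += 1 else: obj[char] = default').
def populate_dict (keys : List String) (default : Int) : List (String × Int) :=
  (keys.foldl (fun obj char =>
    if obj.contains char then obj.insert char (obj.getD char 0 + 1)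
    else obj.insert char default) PySem.Dict.empty).items

-- ===== PORT B =====
-- Literal port of B: Counter(keys) first, then one mapping pass over its items.
def populate_dict_alt (keys : List String) (default : Int) : List (String × Int) :=
  (PySem.Dict.counter keys).items.map (fun p => (p.1, default + p.2 - 1))

-- ===== PRECONDITION & SPEC =====
def Spec_populate_dict (keys : List String) (default : Int) (out : List (String × Int)) : Prop := out = populate_dict_alt keys default
instance (keys : List String) (default : Int) (out : List (String × Int)) : Decidable (Spec_populate_dict keys default out) := by unfold Spec_populate_dict; infer_instance

-- ===== CLAIM (what is proved, stated in full; the proofs are below) =====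
def Claim_equal_populate_dict : Prop := ∀ (keys : List String) (default : Int), Dom_populate_dict keys default → Spec_populate_dict keys default (populate_dict keys default)

-- ===== LEMMAS AND PROOFS =====

-- A's loop body always inserts at char; the branch only chooses the value.
theorem pvA_step_eq (default : Int) :
    (fun (obj : PySem.Dict String Int) (char : String) =>
      if obj.contains char then obj.insert char (obj.getD char 0 + 1)
      else obj.insert char default)
    = (fun obj char => obj.insert char
        (if obj.contains char then obj.getD char 0 + 1 else default)) := by
  funext obj char
  by_cases h : obj.contains char = true <;> simp [h]

-- Every lookup in A's accumulated dict, with fallback default - 1, follows the count.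
theorem pvA_getD (default : Int) (l : List String) (d : PySem.Dict String Int) (k : String) :
    (l.foldl (fun obj char => obj.insert char
        (if obj.contains char then obj.getD char 0 + 1 else default)) d).getD k (default - 1)
      = d.getD k (default - 1) + l.count k := by
  induction l generalizing d with
  | nil => simp
  | cons x xs ih =>
    simp only [List.foldl_cons, ih, List.count_cons]
    rw [PySem.Dict.getD_insert]
    by_cases hx : k = x
    · subst hx
      by_cases h : d.contains k = true
      · have hs : (d.get? k).isSome := by rw [← PySem.Dict.contains_eq_isSome_get?, h]
        obtain ⟨v, hv⟩ := Option.isSome_iff_exists.mp hs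
        rw [PySem.Dict.getD_of_get?_eq_some d 0 hv, PySem.Dict.getD_of_get?_eq_some d (default - 1) hv]
        simp [h]
        omega
      · have h' : d.contains k = false := by simpa using h
        rw [PySem.Dict.getD_of_not_contains d (default - 1) h']
        simp [h']
    · have hx' : x ≠ k := fun h => hx h.symm
      rw [if_neg hx]
      simp [hx']

theorem pvA_keys (default : Int) (keys : List String) :
    (keys.foldl (fun obj char => obj.insert char
        (if obj.contains char then obj.getD char 0 + 1 else default))
      (PySem.Dict.empty : PySem.Dict String Int)).keys = PySem.Set.ofList keys := by
  rw [PySem.Dict.keys_foldl_insert]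
  simp [PySem.Set.update_nil_left]

theorem pvA_nodup_keys (default : Int) (keys : List String) :
    (keys.foldl (fun obj char => obj.insert char
        (if obj.contains char then obj.getD char 0 + 1 else default))
      (PySem.Dict.empty : PySem.Dict String Int)).keys.Nodup := by
  exact PySem.Dict.nodup_keys_foldl_insert _ _ _ (by simp)

-- ===== VERDICT (by name: the statement is the Claim_ definition above) =====
theorem populate_dict_spec : Claim_equal_populate_dict := by
  intro keys default _
  unfold Spec_populate_dict populate_dict populate_dict_alt
  rw [pvA_step_eq default]
  rw [PySem.Dict.items_eq_map_keys _ (pvA_nodup_keys default keys) (default - 1)]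
  rw [pvA_keys default keys, PySem.Dict.items_counter, List.map_map]
  refine List.map_congr_left ?_
  intro k _
  simp only [Function.comp]
  have := pvA_getD default keys (PySem.Dict.empty : PySem.Dict String Int) k
  rw [this]
  simp [PySem.Dict.getD_empty]
  omega
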